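-- pv_equiv track=rewrite | github.com/gabrielbribeiroo/Competitive_Programming | Beecrowd/AD-HOC/Python/2453_LinguaDoP.py | decodificar_mensagem
-- ===== SOURCE A (Python) =====
-- def decodificar_mensagem(codificada):
--     decodificada = []
--     i = 0
--     while (i < len(codificada)):
--         if (codificada[i] == 'p') and (i+1 < len(codificada)):
--             i += 1
--         decodificada.append(codificada[i])
--         i += 1
--     return ''.join(decodificada)
-- ===== SOURCE B (Python) =====
-- import re
--
-- def decodificar_mensagem(codificada):
--     # 'p' is an escape marker: each non-overlapping 'p<char>' pair decodes to <char>.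
--     # re.sub scans left to right without overlap, which matches the unit consumption
--     # of the original index loop; DOTALL lets '.' match a newline after 'p'.
--     return re.sub('p(.)', lambda m: m.group(1), codificada, flags=re.DOTALL)
-- ===== Notes on version B (the rewrite author's own statement) =====
-- stated objective: idiomatic
-- what changed: Replaces the manual index-stepping while loop with a single non-overlapping regex substitution (re.sub with a group-capturing pattern and a lambda replacement, DOTALL), treating the marker as an escape character.
import Mathlib
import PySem

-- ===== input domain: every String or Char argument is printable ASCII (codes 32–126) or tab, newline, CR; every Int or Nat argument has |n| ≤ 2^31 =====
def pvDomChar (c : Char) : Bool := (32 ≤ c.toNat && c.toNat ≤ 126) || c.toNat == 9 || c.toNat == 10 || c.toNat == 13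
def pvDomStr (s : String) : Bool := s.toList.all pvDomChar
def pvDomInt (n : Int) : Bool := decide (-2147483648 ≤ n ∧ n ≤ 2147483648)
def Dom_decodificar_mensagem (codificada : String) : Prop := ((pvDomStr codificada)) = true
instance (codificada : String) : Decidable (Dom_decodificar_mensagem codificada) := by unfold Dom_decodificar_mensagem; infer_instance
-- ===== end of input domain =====

-- B replaces A's manual index loop by a single left-to-right regex substitution
-- re.sub('p(.)', …) (idiomatic); equivalence of return values is proved below.

-- ===== PORT A =====
-- A's while-loop over index i, accumulating characters; the 'if' advances i past a
-- 'p' marker when a following character exists.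
def pvLoopA (l : List Char) (i : Nat) (acc : List Char) : List Char :=
  if h : i < l.length then
    if hp : l[i] = 'p' ∧ i + 1 < l.length then
      -- i += 1 inside the if, then append codificada[i] and i += 1
      pvLoopA l (i + 2) (acc ++ [l[i + 1]])
    else
      pvLoopA l (i + 1) (acc ++ [l[i]])
  else acc
termination_by l.length - i

def decodificar_mensagem (codificada : String) : String :=
  String.ofList (pvLoopA codificada.toList 0 [])

-- ===== PORT B =====
-- re.sub('p(.)', λ m => m.group 1, s, DOTALL): one non-overlapping left-to-right
-- scan; each 'p' followed by any character (incl. newline) is replaced by that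
-- character, a trailing lone 'p' is left as-is.
def pvRegexSub (l : List Char) : List Char :=
  match l with
  | [] => []
  | c :: rest =>
    if c = 'p' then
      match rest with
      | [] => [c]                     -- no following char: pattern does not match
      | d :: rest' => d :: pvRegexSub rest'
    else c :: pvRegexSub rest

def decodificar_mensagem_alt (codificada : String) : String :=
  String.ofList (pvRegexSub codificada.toList)

-- ===== PRECONDITION & SPEC =====
def Spec_decodificar_mensagem (codificada : String) (out : String) : Prop := out = decodificar_mensagem_alt codificada
instance (codificada : String) (out : String) : Decidable (Spec_decodificar_mensagem codificada out) := by unfold Spec_decodificar_mensagem; infer_instance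

-- ===== CLAIM (what is proved, stated in full; the proofs are below) =====
def Claim_equal_decodificar_mensagem : Prop := ∀ (codificada : String), Dom_decodificar_mensagem codificada → Spec_decodificar_mensagem codificada (decodificar_mensagem codificada)

-- ===== LEMMAS AND PROOFS =====

-- On a head that is not 'p' the regex scan keeps it and continues on the tail.
theorem pvRegexSub_cons_ne (c : Char) (rest : List Char) (hc : c ≠ 'p') :
    pvRegexSub (c :: rest) = c :: pvRegexSub rest := by
  cases rest <;> simp [pvRegexSub, hc]

-- Loop invariant: A's loop from index i produces acc ++ the regex scan of the
-- remaining suffix.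
theorem pvLoopA_eq (n : Nat) : ∀ (l : List Char) (i : Nat) (acc : List Char),
    l.length - i ≤ n → pvLoopA l i acc = acc ++ pvRegexSub (l.drop i) := by
  induction n with
  | zero =>
    intro l i acc h
    have hge : l.length ≤ i := by omega
    rw [pvLoopA, dif_neg (by omega), List.drop_eq_nil_of_le hge]
    simp [pvRegexSub]
  | succ n ih =>
    intro l i acc h
    by_cases hi : i < l.length
    · have hdrop : l.drop i = l[i] :: l.drop (i + 1) := List.drop_eq_getElem_cons hi
      by_cases hp : l[i] = 'p' ∧ i + 1 < l.length
      · have hdrop2 : l.drop (i + 1) = l[i + 1] :: l.drop (i + 2) :=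
          List.drop_eq_getElem_cons hp.2
        rw [pvLoopA, dif_pos hi, dif_pos hp, ih l (i + 2) _ (by omega),
          hdrop, hdrop2, pvRegexSub, if_pos hp.1]
        simp
      · rw [pvLoopA, dif_pos hi, dif_neg hp, ih l (i + 1) _ (by omega), hdrop]
        by_cases hc : l[i] = 'p'
        · have hlen : l.length ≤ i + 1 := by
            by_contra hlt; exact hp ⟨hc, by omega⟩
          rw [List.drop_eq_nil_of_le hlen]
          simp [pvRegexSub, hc]
        · rw [pvRegexSub_cons_ne _ _ hc]
          simp
    · rw [pvLoopA, dif_neg hi, List.drop_eq_nil_of_le (by omega)]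
      simp [pvRegexSub]

-- ===== VERDICT (by name: the statement is the Claim_ definition above) =====
theorem decodificar_mensagem_spec : Claim_equal_decodificar_mensagem := by
  intro s _
  unfold Spec_decodificar_mensagem decodificar_mensagem decodificar_mensagem_alt
  rw [pvLoopA_eq s.toList.length s.toList 0 [] (by omega)]
  simp
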